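-- pv_equiv track=rewrite | github.com/Elmer-Carvalho/AInBox | backend/app/services/security_validator.py | _is_suspicious_filename
-- ===== SOURCE A (Python) =====
-- def _is_suspicious_filename(filename: str) -> bool:
--     """Check if filename contains suspicious patterns"""
--     suspicious_patterns = [
--         '..',  # Path traversal
--         '/',   # Path separator
--         '\\',  # Windows path separator
--         '<',   # HTML/XML tags
--         '>',   # HTML/XML tags
--         '|',   # Command separator
--         '&',   # Command separator
--         ';',   # Command separator
--         '`',   # Command substitution
--         '$',   # Variable substitution
--         '(',   # Command grouping
--         ')',   # Command grouping
--     ]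
--
--     filename_lower = filename.lower()
--     return any(pattern in filename_lower for pattern in suspicious_patterns)
-- ===== SOURCE B (Python) =====
-- def _is_suspicious_filename(filename: str) -> bool:
--     """Check if filename contains suspicious patterns"""
--     prev_dot = False
--     for c in filename:
--         if c in '/\\<>|&;`$()':
--             return True
--         if c == '.':
--             if prev_dot:
--                 return True
--             prev_dot = True
--         else:
--             prev_dot = False
--     return False
-- ===== Notes on version B (the rewrite author's own statement) =====
-- stated objective: alternative
-- what changed: Replaces twelve substring scans over a lowercased copy with a single-pass finite-state scan of the raw filename that early-returns on a suspicious character or on a second consecutive dot (no lowercasing and no substring search: lower() cannot affect any of the patterns).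
import Mathlib
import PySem

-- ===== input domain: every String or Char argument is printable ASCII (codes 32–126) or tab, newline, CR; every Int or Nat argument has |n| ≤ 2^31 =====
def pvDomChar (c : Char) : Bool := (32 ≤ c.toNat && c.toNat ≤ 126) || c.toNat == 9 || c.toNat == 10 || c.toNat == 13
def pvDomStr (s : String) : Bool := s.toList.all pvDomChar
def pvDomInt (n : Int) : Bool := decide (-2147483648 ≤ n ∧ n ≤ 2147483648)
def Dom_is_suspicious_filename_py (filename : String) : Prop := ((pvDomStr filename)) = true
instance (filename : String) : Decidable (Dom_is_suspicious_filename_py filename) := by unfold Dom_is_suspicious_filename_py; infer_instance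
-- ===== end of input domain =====

-- B replaces the twelve substring scans over a lowercased copy with a single-pass state-machine scan
-- of the raw filename (early return on a suspicious char or a second consecutive dot); same return value.

-- ===== PORT A =====
def is_suspicious_filename_py (filename : String) : Bool :=
  let suspicious_patterns : List String := ["..", "/", "\\", "<", ">", "|", "&", ";", "`", "$", "(", ")"]
  let filename_lower := PySem.Str.lower filename
  suspicious_patterns.any (fun p => PySem.Str.isIn p filename_lower)

-- ===== PORT B =====
-- the for-loop of Source B: one pass over the characters, carrying prev_dot
def suspScan : List Char → Bool → Bool
  | [], _ => false
  | c :: rest, prev_dot =>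
    if PySem.Chars.isIn [c] "/\\<>|&;`$()".toList then true
    else if c = '.' then (if prev_dot then true else suspScan rest true)
    else suspScan rest false

def is_suspicious_filename_py_alt (filename : String) : Bool :=
  suspScan filename.toList false

-- ===== PRECONDITION & SPEC =====
def Spec_is_suspicious_filename_py (filename : String) (out : Bool) : Prop := out = is_suspicious_filename_py_alt filename
instance (filename : String) (out : Bool) : Decidable (Spec_is_suspicious_filename_py filename out) := by unfold Spec_is_suspicious_filename_py; infer_instance

-- ===== CLAIM =====
def Claim_equal_is_suspicious_filename_py : Prop := ∀ (filename : String), Dom_is_suspicious_filename_py filename → Spec_is_suspicious_filename_py filename (is_suspicious_filename_py filename)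

-- ===== LEMMAS AND PROOFS =====

def suspChar (c : Char) : Bool := c ∈ ['/', '\\', '<', '>', '|', '&', ';', '`', '$', '(', ')']

-- a one-character substring occurs iff that character is an element
theorem singleton_infix_iff_mem {α : Type} (a : α) (l : List α) : [a] <:+: l ↔ a ∈ l := by
  constructor
  · intro h; exact h.mem (List.mem_singleton_self a)
  · intro h
    obtain ⟨s, t, rfl⟩ := List.append_of_mem h
    exact ⟨s, t, by simp⟩

theorem suspChar_isIn (c : Char) :
    PySem.Chars.isIn [c] "/\\<>|&;`$()".toList = suspChar c := by
  rw [Bool.eq_iff_iff, PySem.Chars.isIn_iff_infix, singleton_infix_iff_mem]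
  have hL : "/\\<>|&;`$()".toList = ['/', '\\', '<', '>', '|', '&', ';', '`', '$', '(', ')'] := by decide
  rw [hL]; unfold suspChar; simp

-- double-dot detector in structural form
def hasDD : List Char → Bool
  | [] => false
  | [_] => false
  | a :: b :: t => (a = '.' && b = '.') || hasDD (b :: t)

theorem hasDD_iff_infix (l : List Char) : hasDD l = true ↔ ['.', '.'] <:+: l := by
  induction l with
  | nil => simp [hasDD]
  | cons a t ih =>
    cases t with
    | nil =>
      simp only [hasDD]
      constructor
      · intro h; cases h
      · intro h; have := h.length_le; simp at this
    | cons b t' =>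
      rw [List.infix_cons_iff]
      simp only [hasDD, Bool.or_eq_true, Bool.and_eq_true, decide_eq_true_eq, ih]
      constructor
      · rintro (⟨rfl, rfl⟩ | h)
        · exact Or.inl ⟨t', rfl⟩
        · exact Or.inr h
      · rintro (h | h)
        · obtain ⟨r, hr⟩ := h
          simp only [List.cons_append, List.cons.injEq] at hr
          exact Or.inl ⟨hr.1.symm, hr.2.1.symm⟩
        · exact Or.inr h

-- characterisation of the single-pass scan
theorem suspScan_eq (l : List Char) (prev : Bool) :
    suspScan l prev =
      (l.any suspChar || hasDD l || (prev && (l.head? = some '.'))) := by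
  induction l generalizing prev with
  | nil => simp [suspScan, hasDD]
  | cons c t ih =>
    simp only [suspScan, suspChar_isIn]
    by_cases hs : suspChar c
    · simp [hs]
    · simp only [hs]
      by_cases hc : c = '.'
      · subst hc
        cases prev with
        | false =>
          simp only [if_true, Bool.false_and, ih]
          cases t with
          | nil => simp [hasDD, hs]
          | cons b t' =>
            simp only [hasDD, List.any_cons, hs, Bool.false_or, List.head?_cons]
            by_cases hb : b = '.' <;> simp [hb]
        | true => simp [hs]
      · simp only [if_neg hc, ih, Bool.false_and, Bool.or_false]
        cases t with
        | nil => simp [hasDD, hs, hc]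
        | cons b t' =>
          simp only [hasDD, List.any_cons, hs, Bool.false_or, List.head?_cons]
          have : (c = '.' && b = '.') = false := by simp [hc]
          simp only [this, Bool.false_or]
          cases prev <;> simp [hc]

-- the code points of the suspicious characters
theorem suspChar_vals (d : Char) (h : suspChar d = true) :
    d.toNat = 47 ∨ d.toNat = 92 ∨ d.toNat = 60 ∨ d.toNat = 62 ∨ d.toNat = 124 ∨
    d.toNat = 38 ∨ d.toNat = 59 ∨ d.toNat = 96 ∨ d.toNat = 36 ∨ d.toNat = 40 ∨ d.toNat = 41 := by
  unfold suspChar at h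
  simp only [List.mem_cons, List.not_mem_nil, or_false, decide_eq_true_eq] at h
  rcases h with rfl | rfl | rfl | rfl | rfl | rfl | rfl | rfl | rfl | rfl | rfl <;> simp

theorem lowerChar_of_upper (c : Char) (hu : PySem.Chars.isupper c = true) :
    (PySem.Chars.lowerChar c).toNat = c.toNat + 32 ∧ 65 ≤ c.toNat ∧ c.toNat ≤ 90 := by
  unfold PySem.Chars.isupper at hu
  simp only [Bool.and_eq_true, decide_eq_true_eq] at hu
  have h1 : 65 ≤ c.toNat := hu.1
  have h2 : c.toNat ≤ 90 := hu.2
  refine ⟨?_, h1, h2⟩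
  unfold PySem.Chars.lowerChar
  rw [if_pos]
  · have hv : (c.toNat + 32).isValidChar := Or.inl (by omega)
    simp [Char.ofNat, hv]
  · unfold PySem.Chars.isupper
    simp only [Bool.and_eq_true, decide_eq_true_eq]
    exact hu

-- lowering touches only letters, so it affects neither suspicious characters nor dots
theorem lowerChar_susp (c : Char) : suspChar (PySem.Chars.lowerChar c) = suspChar c := by
  by_cases hu : PySem.Chars.isupper c = true
  · obtain ⟨he, h1, h2⟩ := lowerChar_of_upper c hu
    have hs1 : suspChar c = false := by
      by_contra h
      have := suspChar_vals c (by simpa using h)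
      omega
    have hs2 : suspChar (PySem.Chars.lowerChar c) = false := by
      by_contra h
      have := suspChar_vals _ (by simpa using h)
      omega
    rw [hs1, hs2]
  · have : PySem.Chars.lowerChar c = c := by
      unfold PySem.Chars.lowerChar; rw [if_neg hu]
    rw [this]

theorem lowerChar_dot (c : Char) : (PySem.Chars.lowerChar c = '.') ↔ c = '.' := by
  constructor
  · intro h
    by_cases hu : PySem.Chars.isupper c = true
    · exfalso
      obtain ⟨he, h1, h2⟩ := lowerChar_of_upper c hu
      have := congrArg Char.toNat h
      rw [he] at this
      simp at this
      omega
    · have hc : PySem.Chars.lowerChar c = c := by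
        unfold PySem.Chars.lowerChar; rw [if_neg hu]
      rw [hc] at h; exact h
  · rintro rfl; decide

theorem hasDD_map_lower (l : List Char) :
    hasDD (l.map PySem.Chars.lowerChar) = hasDD l := by
  induction l with
  | nil => rfl
  | cons a t ih =>
    cases t with
    | nil => rfl
    | cons b t' =>
      simp only [List.map_cons, hasDD] at *
      rw [ih]
      congr 1
      congr 1 <;> simp [lowerChar_dot]

theorem lowerChar_fix (d : Char) (h : suspChar d = true) : PySem.Chars.lowerChar d = d := by
  unfold suspChar at h
  simp only [List.mem_cons, List.not_mem_nil, or_false, decide_eq_true_eq] at h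
  rcases h with rfl | rfl | rfl | rfl | rfl | rfl | rfl | rfl | rfl | rfl | rfl <;> decide

-- ===== VERDICT =====
theorem is_suspicious_filename_py_spec : Claim_equal_is_suspicious_filename_py := by
  intro filename _
  unfold Spec_is_suspicious_filename_py is_suspicious_filename_py is_suspicious_filename_py_alt
  rw [Bool.eq_iff_iff, suspScan_eq]
  simp only [Bool.false_and, Bool.or_false]
  have hlow : (PySem.Str.lower filename).toList = filename.toList.map PySem.Chars.lowerChar := by
    rw [PySem.Str.toList_lower]; rfl
  have tdd : (".." : String).toList = ['.', '.'] := rfl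
  have t0 : ("/" : String).toList = ['/'] := rfl
  have t1 : ("\\" : String).toList = ['\\'] := rfl
  have t2 : ("<" : String).toList = ['<'] := rfl
  have t3 : (">" : String).toList = ['>'] := rfl
  have t4 : ("|" : String).toList = ['|'] := rfl
  have t5 : ("&" : String).toList = ['&'] := rfl
  have t6 : (";" : String).toList = [';'] := rfl
  have t7 : ("`" : String).toList = ['`'] := rfl
  have t8 : ("$" : String).toList = ['$'] := rfl
  have t9 : ("(" : String).toList = ['('] := rfl
  have t10 : (")" : String).toList = [')'] := rfl
  simp only [List.any_cons, List.any_nil, Bool.or_eq_true, Bool.or_false,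
    PySem.Str.isIn_iff_infix, hlow, tdd, t0, t1, t2, t3, t4, t5, t6, t7, t8, t9, t10]
  constructor
  · rintro (h | h)
    · have hd := (hasDD_iff_infix _).mpr h
      rw [hasDD_map_lower] at hd
      exact Or.inr hd
    · left
      rw [List.any_eq_true]
      rcases h with h | h | h | h | h | h | h | h | h | h | h <;>
        · rw [singleton_infix_iff_mem, List.mem_map] at h
          obtain ⟨d, hd, he⟩ := h
          refine ⟨d, hd, ?_⟩
          have hs := lowerChar_susp d
          rw [he] at hs
          rw [← hs]; decide
  · rintro (h | h)
    · obtain ⟨d, hd, hs⟩ := List.any_eq_true.mp h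
      have hfix := lowerChar_fix d hs
      have hinf : [d] <:+: filename.toList.map PySem.Chars.lowerChar :=
        (singleton_infix_iff_mem _ _).mpr (List.mem_map.mpr ⟨d, hd, hfix⟩)
      right
      unfold suspChar at hs
      simp only [List.mem_cons, List.not_mem_nil, or_false, decide_eq_true_eq] at hs
      rcases hs with rfl | rfl | rfl | rfl | rfl | rfl | rfl | rfl | rfl | rfl | rfl <;> tauto
    · exact Or.inl ((hasDD_iff_infix _).mp (by rw [hasDD_map_lower]; exact h))
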